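-- pv_equiv track=rewrite | github.com/MyComputerBoy/Sch-n-Core-Delta-v.0.5.0 | uac.py | gin
-- ===== SOURCE A (Python) =====
-- def gin( if_marks, ln ):
-- 	lwoz = len( if_marks ) - 1
-- 	for i, _ in enumerate(if_marks):
-- 		for j in if_marks[i]:
-- 			if if_marks[i][j]["1"] == ln - 2:
-- 				lwoz = i
-- 				break
-- 	return str( lwoz )
-- ===== SOURCE B (Python) =====
-- def gin(if_marks, ln):
--     target = ln - 2
--     for i in reversed(range(len(if_marks))):
--         if any(d["1"] == target for d in if_marks[i].values()):
--             return str(i)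
--     return str(len(if_marks) - 1)
-- ===== Notes on version B (the rewrite author's own statement) =====
-- stated objective: alternative
-- what changed: Forward scan over all groups with an overwritten accumulator is replaced by a reverse index scan that returns the first (i.e. last) matching group directly, testing each group with any() over the dict values instead of a key-iteration loop with break.
-- outside the precondition, e.g. on gin([{'a': {'1': 3}, 'b': {}}], 5): A returns '0', B returns '0'
import Mathlib
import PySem

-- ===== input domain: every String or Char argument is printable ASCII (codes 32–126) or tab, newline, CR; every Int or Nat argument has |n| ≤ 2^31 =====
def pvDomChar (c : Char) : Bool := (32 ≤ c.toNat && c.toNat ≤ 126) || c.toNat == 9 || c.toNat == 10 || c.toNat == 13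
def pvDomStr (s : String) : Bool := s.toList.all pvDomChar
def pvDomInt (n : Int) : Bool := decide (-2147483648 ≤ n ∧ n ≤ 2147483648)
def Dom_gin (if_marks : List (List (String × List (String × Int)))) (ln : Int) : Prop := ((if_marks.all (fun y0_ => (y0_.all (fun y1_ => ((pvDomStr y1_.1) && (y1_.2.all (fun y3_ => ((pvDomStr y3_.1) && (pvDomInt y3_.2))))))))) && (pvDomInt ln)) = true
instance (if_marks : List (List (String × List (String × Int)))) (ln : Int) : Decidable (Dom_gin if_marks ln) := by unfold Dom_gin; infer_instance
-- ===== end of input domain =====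

-- B scans the group indices in reverse and returns on the first (i.e. last) matching group,
-- instead of A's forward scan over everything with an overwritten accumulator. Same cost class.

-- first-match association-list lookup = Python dict indexing (none = KeyError, excluded by Pre_)
def pvLookup {α : Type} : List (String × α) → String → Option α
  | [], _ => none
  | (k, v) :: rest, x => if k = x then some v else pvLookup rest x

-- ===== PORT A =====
-- A's inner loop: iterate the dict's keys in order, look each key up, break at the first match.
def ginKeyScan (grp : List (String × List (String × Int))) (keys : List String) (target : Int) : Bool :=
  match keys with
  | [] => false
  | j :: rest =>
    if (pvLookup ((pvLookup grp j).getD []) "1").getD 0 = target then true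
    else ginKeyScan grp rest target

def gin (if_marks : List (List (String × List (String × Int)))) (ln : Int) : String :=
  PySem.Int.toStr
    ((PySem.List.enumerate if_marks).foldl
      (fun acc p => if ginKeyScan p.2 (p.2.map Prod.fst) (ln - 2) then p.1 else acc)
      ((if_marks.length : Int) - 1))

-- ===== PORT B =====
-- any(d["1"] == target for d in group.values())
def ginMatch (grp : List (String × List (String × Int))) (target : Int) : Bool :=
  (grp.map Prod.snd).any (fun d => (pvLookup d "1").getD 0 = target)

-- the reversed(range(len(if_marks))) loop with its early return
def ginRevScan (groups : List (Int × List (String × List (String × Int)))) (target : Int) : Option Int :=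
  match groups with
  | [] => none
  | (i, g) :: rest => if ginMatch g target then some i else ginRevScan rest target

def gin_alt (if_marks : List (List (String × List (String × Int)))) (ln : Int) : String :=
  match ginRevScan (PySem.List.enumerate if_marks).reverse (ln - 2) with
  | some i => PySem.Int.toStr i
  | none => PySem.Int.toStr ((if_marks.length : Int) - 1)

-- ===== PRECONDITION & SPEC =====
-- Pre_ excludes inputs where some inner dict lacks the key "1" (Python A raises KeyError there
-- unless an earlier entry of the same group already matched, in which case both programs return
-- the same value), and association lists with duplicate keys inside a group (unreachable from a
-- real Python dict, whose keys are unique).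
def Pre_gin (if_marks : List (List (String × List (String × Int)))) (_ln : Int) : Prop :=
  ∀ grp ∈ if_marks, (grp.map Prod.fst).Nodup ∧ ∀ p ∈ grp, "1" ∈ p.2.map Prod.fst
instance (if_marks : List (List (String × List (String × Int)))) (ln : Int) : Decidable (Pre_gin if_marks ln) := by unfold Pre_gin; infer_instance

def pvWitness_gin : (List (List (String × List (String × Int)))) × Int :=
  ([[("a", [("1", 3)])], [("b", [("1", 9), ("2", 0)])]], 5)

def Spec_gin (if_marks : List (List (String × List (String × Int)))) (ln : Int) (out : String) : Prop := out = gin_alt if_marks ln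
instance (if_marks : List (List (String × List (String × Int)))) (ln : Int) (out : String) : Decidable (Spec_gin if_marks ln out) := by unfold Spec_gin; infer_instance

-- ===== CLAIM (what is proved, stated in full; the proofs are below) =====
def Claim_equal_gin : Prop := ∀ (if_marks : List (List (String × List (String × Int)))) (ln : Int), Dom_gin if_marks ln → Pre_gin if_marks ln → Spec_gin if_marks ln (gin if_marks ln)

-- ===== LEMMAS AND PROOFS =====

-- replacing the dict in ginKeyScan changes nothing if every scanned key looks up the same
theorem ginKeyScan_congr (grp grp' : List (String × List (String × Int))) (keys : List String)
    (target : Int) (h : ∀ j ∈ keys, pvLookup grp j = pvLookup grp' j) :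
    ginKeyScan grp keys target = ginKeyScan grp' keys target := by
  induction keys with
  | nil => rfl
  | cons j rest ih =>
    simp only [ginKeyScan, h j (by simp)]
    split_ifs with hc
    · rfl
    · exact ih (fun x hx => h x (by simp [hx]))

-- under unique keys, A's key-iteration-with-lookup equals B's direct scan of the values
theorem ginKeyScan_eq_ginMatch (grp : List (String × List (String × Int))) (target : Int)
    (h : (grp.map Prod.fst).Nodup) :
    ginKeyScan grp (grp.map Prod.fst) target = ginMatch grp target := by
  induction grp with
  | nil => rfl
  | cons kv rest ih =>
    obtain ⟨k, v⟩ := kv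
    simp only [List.map_cons, List.nodup_cons] at h
    have hstep : ginKeyScan ((k, v) :: rest) (rest.map Prod.fst) target
        = ginKeyScan rest (rest.map Prod.fst) target := by
      apply ginKeyScan_congr
      intro j hj
      have hne : k ≠ j := fun he => h.1 (he ▸ hj)
      simp [pvLookup, hne]
    by_cases hpc : (pvLookup v "1").getD 0 = target
    · simp [ginKeyScan, pvLookup, ginMatch, hpc]
    · simp only [List.map_cons, ginKeyScan, pvLookup, hstep, ih h.2, ginMatch, List.map_cons, List.any_cons]
      simp [hpc]

-- the forward overwrite-fold equals the first match of the reversed list (or the initial value)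
theorem foldl_eq_revScan (ps : List (Int × List (String × List (String × Int))))
    (init : Int) (target : Int) :
    ps.foldl (fun acc p => if ginMatch p.2 target then p.1 else acc) init
      = (match ginRevScan ps.reverse target with
         | some i => i
         | none => init) := by
  induction ps using List.reverseRecOn with
  | nil => rfl
  | append_singleton ps p ih =>
    obtain ⟨i, g⟩ := p
    rw [List.foldl_append]
    simp only [List.foldl_cons, List.foldl_nil, List.reverse_append, List.reverse_cons,
      List.reverse_nil, List.nil_append, List.cons_append, List.nil_append, ginRevScan]
    split_ifs with hc
    · rfl
    · exact ih

-- ===== VERDICT (by name: the statement is the Claim_ definition above) =====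
theorem gin_spec : Claim_equal_gin := by
  intro if_marks ln _ hpre
  unfold Spec_gin gin gin_alt
  have hcong : (PySem.List.enumerate if_marks).foldl
      (fun acc p => if ginKeyScan p.2 (p.2.map Prod.fst) (ln - 2) then p.1 else acc)
      ((if_marks.length : Int) - 1)
      = (PySem.List.enumerate if_marks).foldl
      (fun acc p => if ginMatch p.2 (ln - 2) then p.1 else acc)
      ((if_marks.length : Int) - 1) := by
    apply PySem.List.foldl_congr_mem
    intro acc p hp
    have hmem : p.2 ∈ if_marks := by
      rcases (PySem.List.mem_enumerate_iff _ _ _).1 hp with ⟨k, hk, hpk⟩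
      subst hpk
      exact List.getElem_mem hk
    rw [ginKeyScan_eq_ginMatch p.2 (ln - 2) (hpre p.2 hmem).1]
  rw [hcong, foldl_eq_revScan]
  cases ginRevScan (PySem.List.enumerate if_marks).reverse (ln - 2) <;> rfl
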